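-- pv_equiv track=rewrite | github.com/narnarr/sparta_review | zodiac.py | zodiac_animals
-- ===== SOURCE A (Python) =====
-- def zodiac_animals(birth_year):
--     my_zodiac = ''
--     years = [1900+12*i for i in range(0,11)]
--     for year in years:
--         if birth_year == year:
--             my_zodiac = '쥐'
--         elif birth_year == year+1:
--             my_zodiac = '소'
--         elif birth_year == year+2:
--             my_zodiac = '호랑이'
--         elif birth_year == year+3:
--             my_zodiac = '토끼'
--         elif birth_year == year+4:
--             my_zodiac = '용'
--         elif birth_year == year+5:
--             my_zodiac = '뱀'
--         elif birth_year == year+6: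
--             my_zodiac = '말'
--         elif birth_year == year+7:
--             my_zodiac = '양'
--         elif birth_year == year+8:
--             my_zodiac = '원숭이'
--         elif birth_year == year+9:
--             my_zodiac = '닭'
--         elif birth_year == year+10:
--             my_zodiac = '개'
--         elif birth_year == year+11:
--             my_zodiac = '돼지'
--         else:
--             continue
--         return my_zodiac
-- ===== SOURCE B (Python) =====
-- ZODIAC = ['쥐', '소', '호랑이', '토끼', '용', '뱀', '말', '양', '원숭이', '닭', '개', '돼지']
--
-- def zodiac_animals(birth_year):
--     if 1900 <= birth_year <= 2031:
--         return ZODIAC[(birth_year - 1900) % 12]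
--     return None
-- ===== Notes on version B (the rewrite author's own statement) =====
-- stated objective: simpler
-- what changed: Replaces A's nested equality scan over the base-year list with a range check plus a closed-form modulo index into the name cycle.
import Mathlib
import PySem

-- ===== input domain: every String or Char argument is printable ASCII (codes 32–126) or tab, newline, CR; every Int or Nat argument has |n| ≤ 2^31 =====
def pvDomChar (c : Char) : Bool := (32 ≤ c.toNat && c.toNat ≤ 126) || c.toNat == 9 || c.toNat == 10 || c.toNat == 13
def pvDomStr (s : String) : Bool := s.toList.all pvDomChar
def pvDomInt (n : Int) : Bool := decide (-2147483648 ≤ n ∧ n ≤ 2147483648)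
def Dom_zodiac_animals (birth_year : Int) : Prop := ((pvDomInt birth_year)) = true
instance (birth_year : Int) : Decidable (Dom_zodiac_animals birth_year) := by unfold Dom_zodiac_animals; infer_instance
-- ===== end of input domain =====

-- B replaces A's 11×12 equality scan with a range check and a closed-form (year-1900) % 12 index (objective: simpler).

-- ===== PORT A =====
-- one pass of A's if/elif chain for a given base year; none = the 'else: continue' branch
def zodiacStep (birth_year : Int) (year : Int) : Option String :=
  if birth_year = year then some "쥐"
  else if birth_year = year + 1 then some "소"
  else if birth_year = year + 2 then some "호랑이"
  else if birth_year = year + 3 then some "토끼"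
  else if birth_year = year + 4 then some "용"
  else if birth_year = year + 5 then some "뱀"
  else if birth_year = year + 6 then some "말"
  else if birth_year = year + 7 then some "양"
  else if birth_year = year + 8 then some "원숭이"
  else if birth_year = year + 9 then some "닭"
  else if birth_year = year + 10 then some "개"
  else if birth_year = year + 11 then some "돼지"
  else none

-- A's 'for year in years' loop with early return on a match
def zodiacLoop (birth_year : Int) : List Int → Option String
  | [] => none
  | y :: rest =>
    match zodiacStep birth_year y with
    | some s => some s
    | none => zodiacLoop birth_year rest

def zodiac_animals (birth_year : Int) : Option String :=
  zodiacLoop birth_year ((List.range 11).map (fun i => 1900 + 12 * (i : Int)))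

-- ===== PORT B =====
def ZODIAC : List String := ["쥐", "소", "호랑이", "토끼", "용", "뱀", "말", "양", "원숭이", "닭", "개", "돼지"]

def zodiac_animals_alt (birth_year : Int) : Option String :=
  if 1900 ≤ birth_year ∧ birth_year ≤ 2031 then
    PySem.List.pyGet? ZODIAC (PySem.Int.mod (birth_year - 1900) 12)
  else none

-- ===== PRECONDITION & SPEC =====
def Spec_zodiac_animals (birth_year : Int) (out : Option String) : Prop := out = zodiac_animals_alt birth_year
instance (birth_year : Int) (out : Option String) : Decidable (Spec_zodiac_animals birth_year out) := by unfold Spec_zodiac_animals; infer_instance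

-- ===== CLAIM (what is proved, stated in full; the proofs are below) =====
def Claim_equal_zodiac_animals : Prop := ∀ (birth_year : Int), Dom_zodiac_animals birth_year → Spec_zodiac_animals birth_year (zodiac_animals birth_year)

-- ===== LEMMAS AND PROOFS =====

lemma step_none (b y : Int) (h : b < y ∨ y + 11 < b) : zodiacStep b y = none := by
  unfold zodiacStep
  rw [if_neg (by omega), if_neg (by omega), if_neg (by omega), if_neg (by omega),
      if_neg (by omega), if_neg (by omega), if_neg (by omega), if_neg (by omega),
      if_neg (by omega), if_neg (by omega), if_neg (by omega), if_neg (by omega)]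

lemma zodiac_out_of_range (y : Int) (h : y < 1900 ∨ 2031 < y) : zodiac_animals y = none := by
  simp only [zodiac_animals, List.range, List.range.loop]
  norm_num [zodiacLoop]
  rw [step_none y 1900 (by omega), step_none y 1912 (by omega), step_none y 1924 (by omega),
      step_none y 1936 (by omega), step_none y 1948 (by omega), step_none y 1960 (by omega),
      step_none y 1972 (by omega), step_none y 1984 (by omega), step_none y 1996 (by omega),
      step_none y 2008 (by omega), step_none y 2020 (by omega)]

lemma alt_out_of_range (y : Int) (h : y < 1900 ∨ 2031 < y) : zodiac_animals_alt y = none := by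
  simp only [zodiac_animals_alt]
  rw [if_neg]; omega

-- ===== VERDICT (by name: the statement is the Claim_ definition above) =====
theorem zodiac_animals_spec : Claim_equal_zodiac_animals := by
  intro y _
  unfold Spec_zodiac_animals
  by_cases h : 1900 ≤ y ∧ y ≤ 2031
  · obtain ⟨h1, h2⟩ := h
    interval_cases y <;> decide
  · rw [zodiac_out_of_range y (by omega), alt_out_of_range y (by omega)]
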